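-- pv_equiv track=rewrite | github.com/taylor-swift-13/SAM2INV | src/template_generator.py | _append_after_last_annotation
-- ===== SOURCE A (Python) =====
-- from typing import Dict, List, Optional
--
-- def _append_after_last_annotation(annotations: str, new_annotations: List[str]) -> str:
--     """在最后一个注释行之后追加新注释"""
--     if not new_annotations:
--         return annotations
--
--     lines = annotations.splitlines()
--     updated_code = []
--     inserted = False
--
--     for i, line in enumerate(lines):
--         updated_code.append(line)
--         # 找到最后一个注释行（loop invariant 或 loop assigns），在其后插入
--         if ('loop invariant' in line or 'loop assigns' in line) and not inserted:
--             # 检查下一行是否是 */ 或空行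
--             if i + 1 < len(lines):
--                 next_line = lines[i + 1].strip()
--                 if next_line == '*/' or (not next_line and i + 2 < len(lines) and lines[i + 2].strip() == '*/'):
--                     for inv in new_annotations:
--                         updated_code.append(f"          {inv}")
--                     inserted = True
--
--     # 如果没有找到插入位置，在第一个 /*@ 之后插入
--     if not inserted:
--         updated_code = []
--         found_first_annotation = False
--         for line in lines:
--             if not found_first_annotation and '/*@' in line:
--                 updated_code.append(line)
--                 for inv in new_annotations:
--                     updated_code.append(f"          {inv}")
--                 found_first_annotation = True
--             else:
--                 updated_code.append(line)
--
--     return "\n".join(updated_code)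
-- ===== SOURCE B (Python) =====
-- def _append_after_last_annotation(annotations, new_annotations):
--     """Compute an insertion index in one scan, then splice the new lines in."""
--     if not new_annotations:
--         return annotations
--     lines = annotations.splitlines()
--     block = [f"          {inv}" for inv in new_annotations]
--     idx = None
--     for i, line in enumerate(lines):
--         if 'loop invariant' in line or 'loop assigns' in line:
--             if i + 1 < len(lines):
--                 nxt = lines[i + 1].strip()
--                 if nxt == '*/' or (not nxt and i + 2 < len(lines)
--                                    and lines[i + 2].strip() == '*/'):
--                     idx = i
--                     break
--     if idx is None:
--         idx = next((j for j, line in enumerate(lines) if '/*@' in line), None)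
--         if idx is None:
--             return "\n".join(lines)
--     return "\n".join(lines[:idx + 1] + block + lines[idx + 1:])
-- ===== Notes on version B (the rewrite author's own statement) =====
-- stated objective: simpler
-- what changed: B replaces A's two accumulate-as-you-go passes with a single scan that computes an insertion index (with the first-'/*@'-line fallback) and then builds the result by list splicing lines[:i+1] + block + lines[i+1:].
import Mathlib
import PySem

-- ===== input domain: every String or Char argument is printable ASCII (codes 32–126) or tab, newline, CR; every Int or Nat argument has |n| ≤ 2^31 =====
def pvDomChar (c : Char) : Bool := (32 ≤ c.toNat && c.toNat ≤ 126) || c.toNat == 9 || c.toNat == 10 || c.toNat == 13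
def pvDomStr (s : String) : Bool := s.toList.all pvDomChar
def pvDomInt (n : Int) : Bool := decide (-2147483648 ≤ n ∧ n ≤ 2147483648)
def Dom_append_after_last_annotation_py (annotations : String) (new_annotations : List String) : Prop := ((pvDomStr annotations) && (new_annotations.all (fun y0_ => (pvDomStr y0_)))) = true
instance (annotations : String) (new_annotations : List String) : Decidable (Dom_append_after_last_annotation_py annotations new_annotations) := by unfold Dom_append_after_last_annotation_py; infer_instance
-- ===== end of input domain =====

-- B computes one insertion index in a single scan and splices; A accumulates the
-- output line by line in two passes.  Same return value everywhere (objective: simpler).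

-- ===== PORT A =====

-- f"          {inv}"
def pvPad (inv : String) : String := "          " ++ inv

-- the lookahead test of A's first loop (next line '*/', or blank then '*/')
def pvANext (lines : List String) (i : Nat) : Bool :=
  if i + 1 < lines.length then
    let next_line := PySem.Str.strip (lines.getD (i + 1) "")
    (next_line == "*/" || (next_line == "" && decide (i + 2 < lines.length) && PySem.Str.strip (lines.getD (i + 2) "") == "*/"))
  else false

-- the first for-loop of A: state (updated_code, inserted), i the running index
def pvALoop1 (lines new_annotations : List String) : Nat → List String → List String × Bool → List String × Bool
  | _, [], st => st
  | i, line :: rest, (acc, inserted) =>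
    let acc' := acc ++ [line]
    if ((PySem.Str.isIn "loop invariant" line || PySem.Str.isIn "loop assigns" line) && !inserted) && pvANext lines i then
      pvALoop1 lines new_annotations (i + 1) rest (acc' ++ new_annotations.map pvPad, true)
    else
      pvALoop1 lines new_annotations (i + 1) rest (acc', inserted)

-- the fallback for-loop of A: state (updated_code, found_first_annotation)
def pvALoop2 (new_annotations : List String) : List String → List String × Bool → List String
  | [], (acc, _) => acc
  | line :: rest, (acc, found) =>
    if (!found && PySem.Str.isIn "/*@" line) then
      pvALoop2 new_annotations rest (acc ++ [line] ++ new_annotations.map pvPad, true)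
    else
      pvALoop2 new_annotations rest (acc ++ [line], found)

def append_after_last_annotation_py (annotations : String) (new_annotations : List String) : String :=
  if new_annotations = [] then annotations
  else
    let lines := PySem.Str.splitlines annotations
    let res := pvALoop1 lines new_annotations 0 lines ([], false)
    let updated_code := if res.2 then res.1 else pvALoop2 new_annotations lines ([], false)
    PySem.Str.join "\n" updated_code

-- ===== PORT B =====

-- the single scan of B: first index whose line matches and whose lookahead holds
def pvBLookahead (rest : List String) : Bool :=
  match rest with
  | [] => false
  | n :: rest2 =>
    let s := PySem.Str.strip n
    s == "*/" || (s == "" && (match rest2 with | m :: _ => PySem.Str.strip m == "*/" | [] => false))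

def pvBFind : List String → Option Nat
  | [] => none
  | line :: rest =>
    if ((PySem.Str.isIn "loop invariant" line || PySem.Str.isIn "loop assigns" line) && pvBLookahead rest) then
      some 0
    else (pvBFind rest).map (· + 1)

def append_after_last_annotation_py_alt (annotations : String) (new_annotations : List String) : String :=
  if new_annotations = [] then annotations
  else
    let lines := PySem.Str.splitlines annotations
    let block := new_annotations.map (fun inv => "          " ++ inv)
    match pvBFind lines with
    | some i => PySem.Str.join "\n" (lines.take (i + 1) ++ block ++ lines.drop (i + 1))
    | none =>
      match lines.findIdx? (fun l => PySem.Str.isIn "/*@" l) with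
      | some j => PySem.Str.join "\n" (lines.take (j + 1) ++ block ++ lines.drop (j + 1))
      | none => PySem.Str.join "\n" lines

-- ===== PRECONDITION & SPEC =====
def Spec_append_after_last_annotation_py (annotations : String) (new_annotations : List String) (out : String) : Prop := out = append_after_last_annotation_py_alt annotations new_annotations
instance (annotations : String) (new_annotations : List String) (out : String) : Decidable (Spec_append_after_last_annotation_py annotations new_annotations out) := by unfold Spec_append_after_last_annotation_py; infer_instance

-- ===== CLAIM (what is proved, stated in full; the proofs are below) =====
def Claim_equal_append_after_last_annotation_py : Prop := ∀ (annotations : String) (new_annotations : List String), Dom_append_after_last_annotation_py annotations new_annotations → Spec_append_after_last_annotation_py annotations new_annotations (append_after_last_annotation_py annotations new_annotations)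

-- ===== LEMMAS AND PROOFS =====

-- once inserted, A's first loop just copies the remaining lines
theorem pvALoop1_true (lines new : List String) :
    ∀ (suf : List String) (i : Nat) (acc : List String),
      pvALoop1 lines new i suf (acc, true) = (acc ++ suf, true) := by
  intro suf
  induction suf with
  | nil => intro i acc; simp [pvALoop1]
  | cons l rest ih =>
    intro i acc
    simp only [pvALoop1, Bool.not_true, Bool.and_false, Bool.false_and, ih]
    simp

-- A's lookahead test, read off the suffix after position i, is B's lookahead
theorem pvLookahead_eq (lines : List String) (i : Nat) (l : String) (rest : List String)
    (h : lines.drop i = l :: rest) :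
    pvANext lines i = pvBLookahead rest := by
  have hlen : lines.length - i = rest.length + 1 := by
    have := congrArg List.length h
    simpa using this
  cases rest with
  | nil =>
    have hi1 : ¬ (i + 1 < lines.length) := by simp at hlen; omega
    simp [pvANext, pvBLookahead, hi1]
  | cons n rest2 =>
    have hn : lines.getD (i + 1) "" = n := by
      rw [List.getD_eq_getElem?_getD, ← List.getElem?_drop, h]; rfl
    have hi1 : i + 1 < lines.length := by simp at hlen; omega
    unfold pvANext pvBLookahead
    rw [if_pos hi1, hn]
    cases rest2 with
    | nil =>
      have hi2 : ¬ (i + 2 < lines.length) := by simp at hlen; omega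
      simp [hi2]
    | cons m rest3 =>
      have hm : lines.getD (i + 2) "" = m := by
        rw [List.getD_eq_getElem?_getD, ← List.getElem?_drop, h]; rfl
      have hi2 : i + 2 < lines.length := by simp at hlen; omega
      rw [hm]
      simp [hi2]

-- characterisation of A's first loop in terms of B's single scan
theorem pvALoop1_eq (lines new : List String) :
    ∀ (suf : List String) (i : Nat) (acc : List String),
      lines.drop i = suf →
      pvALoop1 lines new i suf (acc, false) =
        (match pvBFind suf with
         | some k => (acc ++ suf.take (k + 1) ++ new.map pvPad ++ suf.drop (k + 1), true)
         | none => (acc ++ suf, false)) := by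
  intro suf
  induction suf with
  | nil => intro i acc _; simp [pvALoop1, pvBFind]
  | cons l rest ih =>
    intro i acc hdrop
    have hdrop1 : lines.drop (i + 1) = rest := by
      have h2 : lines.drop (i + 1) = (lines.drop i).drop 1 := by rw [List.drop_drop]
      rw [h2, hdrop]; rfl
    have hla := pvLookahead_eq lines i l rest hdrop
    simp only [pvALoop1, Bool.not_false, Bool.and_true, hla]
    by_cases hc : ((PySem.Str.isIn "loop invariant" l || PySem.Str.isIn "loop assigns" l) && pvBLookahead rest) = true
    · rw [if_pos hc, pvALoop1_true]
      simp only [pvBFind, hc, if_true]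
      simp
    · rw [if_neg hc, ih (i + 1) (acc ++ [l]) hdrop1]
      simp only [pvBFind, hc]
      cases pvBFind rest with
      | none => simp
      | some k => simp [List.take_succ_cons, List.drop_succ_cons]

-- characterisation of A's fallback loop in terms of findIdx?
theorem pvALoop2_true (new : List String) :
    ∀ (suf acc : List String), pvALoop2 new suf (acc, true) = acc ++ suf := by
  intro suf
  induction suf with
  | nil => intro acc; simp [pvALoop2]
  | cons l rest ih => intro acc; simp [pvALoop2, ih]

theorem pvALoop2_eq (new : List String) :
    ∀ (suf acc : List String),
      pvALoop2 new suf (acc, false) =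
        (match suf.findIdx? (fun l => PySem.Str.isIn "/*@" l) with
         | some j => acc ++ suf.take (j + 1) ++ new.map pvPad ++ suf.drop (j + 1)
         | none => acc ++ suf) := by
  intro suf
  induction suf with
  | nil => intro acc; simp [pvALoop2]
  | cons l rest ih =>
    intro acc
    by_cases h : PySem.Str.isIn "/*@" l = true
    · have h' : PySem.Chars.isIn ['/', '*', '@'] l.toList = true := by simpa using h
      simp only [pvALoop2, Bool.not_false, Bool.true_and, h, if_true, pvALoop2_true]
      simp [List.findIdx?_cons, h']
    · have h' : PySem.Chars.isIn ['/', '*', '@'] l.toList = false := by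
        simpa using eq_false_of_ne_true h
      simp only [pvALoop2, Bool.not_false, Bool.true_and, eq_false_of_ne_true h]
      rw [ih (acc ++ [l])]
      cases hf : rest.findIdx? (fun l => PySem.Str.isIn "/*@" l) with
      | none =>
        have hf' : rest.findIdx? (fun l => PySem.Chars.isIn ['/', '*', '@'] l.toList) = none := by
          simpa using hf
        simp [List.findIdx?_cons, h', hf']
      | some j =>
        have hf' : rest.findIdx? (fun l => PySem.Chars.isIn ['/', '*', '@'] l.toList) = some j := by
          simpa using hf
        simp [List.findIdx?_cons, h', hf', List.take_succ_cons, List.drop_succ_cons]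

-- ===== VERDICT (by name: the statement is the Claim_ definition above) =====
theorem append_after_last_annotation_py_spec : Claim_equal_append_after_last_annotation_py := by
  intro annotations new_annotations _
  unfold Spec_append_after_last_annotation_py
  unfold append_after_last_annotation_py append_after_last_annotation_py_alt
  by_cases hne : new_annotations = []
  · simp [hne]
  · simp only [hne, if_false]
    set lines := PySem.Str.splitlines annotations with hlines
    have hmap : new_annotations.map pvPad = new_annotations.map (fun inv => "          " ++ inv) := rfl
    have h1 := pvALoop1_eq lines new_annotations lines 0 [] (by simp)
    cases hf : pvBFind lines with
    | some k =>
      rw [hf] at h1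
      simp only [h1, hmap, List.nil_append]
      simp [List.append_assoc]
    | none =>
      rw [hf] at h1
      simp only [h1, List.nil_append]
      rw [pvALoop2_eq new_annotations lines []]
      cases hg : lines.findIdx? (fun l => PySem.Str.isIn "/*@" l) with
      | none => simp
      | some j => simp [hmap, List.append_assoc]
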